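-- pv_equiv track=rewrite | github.com/AlbinSmiley/bezoutPython | base26.py | facteursExponant
-- ===== SOURCE A (Python) =====
-- def dividByTwo(nombre):
--     resultats = []
--     resultats.append(nombre)
--     while nombre > 1:
--         nombre //= 2
--         resultats.append(nombre)
--     return resultats
--
-- def binary(nombre):
--     return bin(nombre)[2:]
--
-- def bibin(nombre):
--     return [int(digit) for digit in binary(nombre)][::-1]
--
-- def modulo(base, modulo, nombre_de_termes):
--     resultats = [base]
--     for i in range(1, nombre_de_termes):
--         resultats.append((resultats[i - 1] ** 2) % modulo)
--     return resultats
--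
-- def exponentiationDe(n,m,a):
--     divisions = dividByTwo(n)
--     nombre_de_termes = len(divisions)
--     binary = bibin(n)
--     mod_results = modulo(a, m, nombre_de_termes)
--     result = [divisions,binary,list(range(nombre_de_termes)),mod_results]
--     return result
--
-- def facteursExponant(n, m, a):
--     # puissance,modulo,base
--     # Appel de la fonction exponentiationDe pour obtenir ses résultats
--     expo = exponentiationDe(n, m, a)
--     # resultat_moduler = exponentiationDe(puissance, modulo, base)
--     length = len(expo[0])
--     result = []
--
--     # Extraction des sous-listes nécessaires
--     for i in range(length) :
--         if expo[1][i] == 1 :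
--             result.append(expo[3][i])
--
--     return result[::-1]
-- ===== SOURCE B (Python) =====
-- def facteursExponant(n, m, a):
--     # Recursive halving: no bit list, no tables, no final reversal.
--     # facteursExponant(n) = facteursExponant(n//2) on the squared base,
--     # followed by the current base iff n is odd (MSB-first by construction).
--     if n <= 0:
--         return []
--     if n == 1:
--         return [a]
--     rest = facteursExponant(n // 2, m, (a * a) % m)
--     return rest + ([a] if n % 2 == 1 else [])
-- ===== Notes on version B (the rewrite author's own statement) =====
-- stated objective: simpler
-- what changed: B replaces A's three staged tables (dividByTwo divisions, bin-string digit list, square-mod table) plus index-selection loop plus final reversal by a direct recursion on n itself: halve n, recurse with the squared base, and append the current base iff n is odd, producing the answer MSB-first with no bit list and no reversal.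
import Mathlib
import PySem

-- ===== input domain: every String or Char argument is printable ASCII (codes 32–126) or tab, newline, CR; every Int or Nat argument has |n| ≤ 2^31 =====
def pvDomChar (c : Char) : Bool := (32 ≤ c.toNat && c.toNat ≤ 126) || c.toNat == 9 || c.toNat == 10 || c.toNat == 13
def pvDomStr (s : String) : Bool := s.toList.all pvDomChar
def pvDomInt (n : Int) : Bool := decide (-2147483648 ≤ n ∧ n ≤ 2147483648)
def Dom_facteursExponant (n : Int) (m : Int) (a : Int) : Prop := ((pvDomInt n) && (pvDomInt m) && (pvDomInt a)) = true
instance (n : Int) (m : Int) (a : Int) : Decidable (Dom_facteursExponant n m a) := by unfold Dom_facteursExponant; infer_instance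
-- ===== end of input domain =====

-- B replaces A's staged tables + selection loop + reversal by a direct recursion on n
-- (halve n, recurse on the squared base, append the base iff n is odd) (objective: simpler).

-- ===== PORT A =====
-- int(d) for a single character d; the .getD 0 default is unreachable under Pre_ (digits are '0'/'1')
def pvDigitInt (c : Char) : Int := (PySem.Int.ofChars? [c]).getD 0

-- 'while nombre > 1: nombre //= 2; resultats.append(nombre)'
def dividByTwoAux (nombre : Int) : List Int :=
  if 1 < nombre then
    let nb := PySem.Int.floordiv nombre 2
    nb :: dividByTwoAux nb
  else []
termination_by nombre.toNat
decreasing_by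
  rw [PySem.Int.floordiv_eq_ediv_of_pos (by omega : (0:Int) < 2)]
  omega

def dividByTwo (nombre : Int) : List Int := nombre :: dividByTwoAux nombre

-- bin(nombre)[2:]
def binaryA (nombre : Int) : List Char :=
  PySem.List.slice (PySem.Int.toBinChars0b nombre) (some 2) none

def bibin (nombre : Int) : List Int := ((binaryA nombre).map pvDigitInt).reverse

-- resultats = [base]; for i in range(1, n): resultats.append(resultats[i-1] ** 2 % m)
def moduloA (base : Int) (m : Int) (terms : Int) : List Int :=
  (PySem.List.pyRange 1 terms 1).foldl
    (fun res i => res ++ [PySem.Int.mod ((PySem.List.pyGetD res (i - 1) 0) ^ 2) m]) [base]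

def exponentiationDe (n : Int) (m : Int) (a : Int) :
    List Int × List Int × List Int × List Int :=
  let divisions := dividByTwo n
  let terms : Int := divisions.length
  let bin := bibin n
  let modResults := moduloA a m terms
  (divisions, bin, PySem.List.pyRange 0 terms 1, modResults)

def facteursExponant (n : Int) (m : Int) (a : Int) : List Int :=
  let expo := exponentiationDe n m a
  let length : Int := expo.1.length
  let result := (PySem.List.pyRange 0 length 1).foldl
    (fun res i =>
      if PySem.List.pyGetD expo.2.1 i 0 = 1 then res ++ [PySem.List.pyGetD expo.2.2.2 i 0]
      else res) ([] : List Int)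
  result.reverse

-- ===== PORT B =====
-- recursion on n: halve, recurse on the squared base, append the base iff n is odd
def facteursExponant_alt (n : Int) (m : Int) (a : Int) : List Int :=
  if n ≤ 0 then []
  else if n = 1 then [a]
  else
    facteursExponant_alt (PySem.Int.floordiv n 2) m (PySem.Int.mod (a * a) m)
      ++ (if PySem.Int.mod n 2 = 1 then [a] else [])
termination_by n.toNat
decreasing_by
  rw [PySem.Int.floordiv_eq_ediv_of_pos (by omega : (0:Int) < 2)]
  omega

-- ===== PRECONDITION & SPEC =====
-- Pre_ excludes exactly where A raises: n < 0 (int('b') on bin(n)[2:] is a ValueError)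
-- and n ≥ 2 with m = 0 (ZeroDivisionError in modulo).
def Pre_facteursExponant (n : Int) (m : Int) (a : Int) : Prop := 0 ≤ n ∧ (2 ≤ n → m ≠ 0)
instance (n : Int) (m : Int) (a : Int) : Decidable (Pre_facteursExponant n m a) := by
  unfold Pre_facteursExponant; infer_instance

def pvWitness_facteursExponant : Int × Int × Int := (6, 5, 2)

def Spec_facteursExponant (n : Int) (m : Int) (a : Int) (out : List Int) : Prop := out = facteursExponant_alt n m a
instance (n : Int) (m : Int) (a : Int) (out : List Int) : Decidable (Spec_facteursExponant n m a out) := by unfold Spec_facteursExponant; infer_instance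

-- ===== CLAIM (what is proved, stated in full; the proofs are below) =====
def Claim_equal_facteursExponant : Prop := ∀ (n : Int) (m : Int) (a : Int), Dom_facteursExponant n m a → Pre_facteursExponant n m a → Spec_facteursExponant n m a (facteursExponant n m a)

-- ===== LEMMAS AND PROOFS =====

-- the number of binary digits of k (with bitsLen 0 = 1, as in bin(0) = '0b0')
def bitsLen (k : Nat) : Nat :=
  if k < 2 then 1 else bitsLen (k / 2) + 1
decreasing_by omega

-- iterated squaring mod m: sqIter m a i = the i-th intermediate, starting unreduced at a
def sqIter (m : Int) (a : Int) : Nat → Int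
  | 0 => a
  | k + 1 => PySem.Int.mod (sqIter m a k * sqIter m a k) m

-- A's result (before the final reverse): walk the LSB-first bit list,
-- collecting cur at set bits, squaring mod m between positions
def selRev (m : Int) : List Int → Int → List Int
  | [], _ => []
  | b :: bs, cur => (if b = 1 then [cur] else []) ++ selRev m bs (PySem.Int.mod (cur * cur) m)

theorem toDigitsCore_two_len : ∀ (f n : Nat) (l : List Char), n < f →
    (Nat.toDigitsCore 2 f n l).length = bitsLen n + l.length := by
  intro f
  induction f with
  | zero => omega
  | succ f ih =>
    intro n l hnf
    rw [Nat.toDigitsCore]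
    by_cases h : n / 2 = 0
    · rw [if_pos h, bitsLen, if_pos (by omega : n < 2)]
      simp only [List.length_cons]; omega
    · rw [if_neg h, ih (n / 2) _ (by omega)]
      conv_rhs => rw [bitsLen]
      rw [if_neg (by omega : ¬ n < 2)]
      simp only [List.length_cons]; omega

theorem toDigits_two_len (k : Nat) : (Nat.toDigits 2 k).length = bitsLen k := by
  have := toDigitsCore_two_len (k + 1) k [] (by omega)
  simpa [Nat.toDigits] using this

theorem dividByTwoAux_len : ∀ (k : Nat) (n : Int), n.toNat = k → 0 ≤ n →
    (dividByTwoAux n).length + 1 = bitsLen n.toNat := by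
  intro k
  induction k using Nat.strong_induction_on with
  | _ k ih =>
    intro n hk hn
    rw [dividByTwoAux]
    by_cases h : 1 < n
    · rw [if_pos h]
      have hfd : PySem.Int.floordiv n 2 = n / 2 :=
        PySem.Int.floordiv_eq_ediv_of_pos (by omega)
      have hrec := ih ((n / 2).toNat) (by rw [hfd] at *; omega) (PySem.Int.floordiv n 2)
        (by rw [hfd]) (by rw [hfd]; omega)
      rw [bitsLen, if_neg (by omega : ¬ n.toNat < 2)]
      simp only [List.length_cons]
      rw [hfd] at hrec ⊢
      have h2 : (n / 2).toNat = n.toNat / 2 := by omega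
      rw [h2] at hrec
      omega
    · rw [if_neg h, bitsLen, if_pos (by omega : n.toNat < 2)]
      simp

theorem bibin_len (n : Int) (hn : 0 ≤ n) : (bibin n).length = bitsLen n.toNat := by
  unfold bibin binaryA
  rw [PySem.List.slice_from _ (by omega : (0:Int) ≤ 2), PySem.Int.toBinChars0b]
  rw [if_neg (by omega : ¬ n < 0)]
  simp [toDigits_two_len]

theorem moduloA_eq (a m : Int) : ∀ (t : Nat),
    moduloA a m ((t : Int) + 1) = (List.range (t + 1)).map (sqIter m a) := by
  intro t
  induction t with
  | zero =>
    simp [moduloA, PySem.List.pyRange_one_eq_nil (by omega : ((1:Int)) ≤ 1), sqIter]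
  | succ t ih =>
    have hsplit : PySem.List.pyRange 1 (((t:Int) + 1) + 1) 1
        = PySem.List.pyRange 1 ((t:Int) + 1) 1 ++ [(t:Int) + 1] :=
      PySem.List.pyRange_one_succ_right (by omega)
    unfold moduloA at ih ⊢
    rw [show ((t + 1 : Nat) : Int) + 1 = (((t:Int) + 1) + 1) by push_cast; ring, hsplit,
      List.foldl_append, ih]
    simp only [List.foldl_cons, List.foldl_nil]
    have hg : PySem.List.pyGetD ((List.range (t + 1)).map (sqIter m a)) ((t:Int) + 1 - 1) 0
        = sqIter m a t := by
      rw [show (t:Int) + 1 - 1 = ((t:Nat):Int) by omega, PySem.List.pyGetD_natCast]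
      exact PySem.List.getD_map_range _ _ _ _ (by omega)
    rw [hg]
    simp [List.range_succ, sqIter, pow_two]

theorem Aloop (m a : Int) (bits : List Int) :
    ∀ (d j : Nat), j + d = bits.length → ∀ (res : List Int),
    (PySem.List.pyRange (j : Int) (bits.length : Int) 1).foldl
      (fun res i =>
        if PySem.List.pyGetD bits i 0 = 1 then
          res ++ [PySem.List.pyGetD ((List.range bits.length).map (sqIter m a)) i 0]
        else res) res
    = res ++ selRev m (bits.drop j) (sqIter m a j) := by
  intro d
  induction d with
  | zero =>
    intro j hj res
    rw [PySem.List.pyRange_one_eq_nil (by omega)]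
    rw [List.drop_eq_nil_of_le (by omega)]
    simp [selRev]
  | succ d ih =>
    intro j hj res
    have hjl : j < bits.length := by omega
    rw [PySem.List.pyRange_one_cons (by exact_mod_cast hjl)]
    simp only [List.foldl_cons]
    rw [show ((j:Int) + 1) = ((j + 1 : Nat) : Int) by push_cast; ring]
    rw [ih (j + 1) (by omega)]
    rw [List.drop_eq_getElem_cons hjl, PySem.List.pyGetD_natCast,
      PySem.List.pyGetD_natCast, List.getD_eq_getElem _ _ hjl,
      PySem.List.getD_map_range _ _ _ _ hjl]
    by_cases hb1 : bits[j] = (1:Int) <;> simp [hb1, selRev, sqIter, List.append_assoc]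

-- fuel irrelevance / unfolding of Nat.toDigitsCore into Nat.toDigits
theorem toDigitsCore_two_eq : ∀ (k : Nat), ∀ (f : Nat) (l : List Char), k < f →
    Nat.toDigitsCore 2 f k l = Nat.toDigits 2 k ++ l := by
  intro k
  induction k using Nat.strong_induction_on with
  | _ k ih =>
    intro f l hkf
    match f with
    | 0 => omega
    | f + 1 =>
      rw [Nat.toDigitsCore]
      by_cases h : k / 2 = 0
      · rw [if_pos h]
        rw [Nat.toDigits, Nat.toDigitsCore, if_pos h]
        simp
      · rw [if_neg h]
        rw [ih (k / 2) (by omega) f (Nat.digitChar (k % 2) :: l) (by omega)]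
        conv_rhs => rw [Nat.toDigits, Nat.toDigitsCore, if_neg h]
        rw [ih (k / 2) (by omega) k [Nat.digitChar (k % 2)] (by omega)]
        simp

-- one binary-digit step: MSB-first digits of k (k ≥ 2) end with the low digit
theorem toDigits_two_step (k : Nat) (hk : 2 ≤ k) :
    Nat.toDigits 2 k = Nat.toDigits 2 (k / 2) ++ [Nat.digitChar (k % 2)] := by
  rw [Nat.toDigits, Nat.toDigitsCore, if_neg (by omega : ¬ k / 2 = 0)]
  exact toDigitsCore_two_eq (k / 2) k [Nat.digitChar (k % 2)] (by omega)

theorem binaryA_nonneg (n : Int) (hn : 0 ≤ n) : binaryA n = Nat.toDigits 2 n.toNat := by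
  unfold binaryA
  rw [PySem.List.slice_from _ (by omega : (0:Int) ≤ 2), PySem.Int.toBinChars0b]
  rw [if_neg (by omega : ¬ n < 0)]
  simp

theorem bibin_step (n : Int) (hn : 2 ≤ n) :
    bibin n = PySem.Int.mod n 2 :: bibin (PySem.Int.floordiv n 2) := by
  have hknat : 2 ≤ n.toNat := by omega
  have hfd : PySem.Int.floordiv n 2 = n / 2 := PySem.Int.floordiv_eq_ediv_of_pos (by omega)
  have hdt : (n / 2).toNat = n.toNat / 2 := by omega
  unfold bibin
  rw [binaryA_nonneg n (by omega), binaryA_nonneg _ (by rw [hfd]; omega)]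
  rw [toDigits_two_step n.toNat hknat]
  rw [hfd, hdt]
  have hmod : PySem.Int.mod n 2 = ((n.toNat % 2 : Nat) : Int) := by
    rw [PySem.Int.mod_eq_emod_of_pos (by omega : (0:Int) < 2)]; omega
  have hdig : pvDigitInt (Nat.digitChar (n.toNat % 2)) = ((n.toNat % 2 : Nat) : Int) := by
    rcases Nat.mod_two_eq_zero_or_one n.toNat with h | h <;> rw [h] <;> decide
  simp [hdig]
  omega

theorem alt_selRev (m : Int) : ∀ (k : Nat) (n : Int), n.toNat = k → 0 ≤ n → ∀ (cur : Int),
    facteursExponant_alt n m cur = (selRev m (bibin n) cur).reverse := by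
  intro k
  induction k using Nat.strong_induction_on with
  | _ k ih =>
    intro n hk hn cur
    rw [facteursExponant_alt]
    by_cases h0 : n ≤ 0
    · rw [if_pos h0]
      have hn0 : n = 0 := by omega
      subst hn0
      have : bibin 0 = [0] := by decide
      rw [this]
      simp [selRev]
    · rw [if_neg h0]
      by_cases h1 : n = 1
      · rw [if_pos h1, h1]
        have : bibin 1 = [1] := by decide
        rw [this]
        simp [selRev]
      · rw [if_neg h1]
        have hn2 : 2 ≤ n := by omega
        have hfd : PySem.Int.floordiv n 2 = n / 2 := PySem.Int.floordiv_eq_ediv_of_pos (by omega)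
        rw [bibin_step n hn2]
        rw [ih ((PySem.Int.floordiv n 2).toNat) (by rw [hfd]; omega) _ rfl (by rw [hfd]; omega)]
        simp only [selRev, List.reverse_append]
        have hmod : PySem.Int.mod n 2 = n % 2 := PySem.Int.mod_eq_emod_of_pos (by omega)
        by_cases hodd : n % 2 = 1 <;> rw [hmod] <;> simp [hodd]

-- ===== VERDICT (by name: the statement is the Claim_ definition above) =====
theorem facteursExponant_spec : Claim_equal_facteursExponant := by
  intro n m a _ hpre
  obtain ⟨hn, _⟩ := hpre
  unfold Spec_facteursExponant
  have hlen : (dividByTwo n).length = (bibin n).length := by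
    have h1 := dividByTwoAux_len n.toNat n rfl hn
    have h2 := bibin_len n hn
    simp only [dividByTwo, List.length_cons]
    omega
  have hmod : moduloA a m ((dividByTwo n).length : Int)
      = (List.range (bibin n).length).map (sqIter m a) := by
    have h3 := moduloA_eq a m (dividByTwoAux n).length
    rw [show (((dividByTwo n).length : Nat) : Int) = ((dividByTwoAux n).length : Int) + 1 by
      simp only [dividByTwo, List.length_cons]; push_cast; ring]
    rw [h3, ← hlen]
    simp [dividByTwo]
  have hA : facteursExponant n m a = (selRev m (bibin n) (sqIter m a 0)).reverse := by
    unfold facteursExponant exponentiationDe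
    simp only []
    rw [hmod, hlen]
    have h4 := Aloop m a (bibin n) (bibin n).length 0 (by omega) []
    simp only [Nat.cast_zero] at h4
    rw [h4]
    simp
  rw [hA, alt_selRev m n.toNat n rfl hn a]
  rfl
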